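-- pv_equiv track=rewrite | github.com/MaxDevv/Un-LOCC | main.py | normalize_for_ocr
-- ===== SOURCE A (Python) =====
-- def normalize_for_ocr(text):
--     """
--     Normalizes a string to account for common OCR errors, making the
--     accuracy comparison more robust and "fuzzy".
--     """
--     replacements = {
--         'O': '0', 'o': '0', 'I': '1', 'l': '1', 'S': '5', 's': '5',
--         'B': '8', 'A': '4', '-': '', ' ': ''
--     }
--     text = text.upper()
--     for old, new in replacements.items():
--         text = text.replace(old, new)
--     return text
-- ===== SOURCE B (Python) =====
-- _OCR_MAP = {'O': '0', 'I': '1', 'S': '5', 'B': '8', 'A': '4', '-': '', ' ': ''}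
--
--
-- def normalize_for_ocr(text):
--     # Single pass: uppercase once, then map each character through a table
--     # ('-' and ' ' map to the empty string, i.e. are deleted).
--     return ''.join(_OCR_MAP.get(c, c) for c in text.upper())
-- ===== Notes on version B (the rewrite author's own statement) =====
-- stated objective: alternative
-- what changed: Replaces A's ten sequential full-string str.replace passes with a single per-character traversal of text.upper() that consults one lookup table and joins the pieces once; asymptotically the same, and CPython's C-level str.replace makes A's passes fast in practice, so no speed is claimed.
import Mathlib
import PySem

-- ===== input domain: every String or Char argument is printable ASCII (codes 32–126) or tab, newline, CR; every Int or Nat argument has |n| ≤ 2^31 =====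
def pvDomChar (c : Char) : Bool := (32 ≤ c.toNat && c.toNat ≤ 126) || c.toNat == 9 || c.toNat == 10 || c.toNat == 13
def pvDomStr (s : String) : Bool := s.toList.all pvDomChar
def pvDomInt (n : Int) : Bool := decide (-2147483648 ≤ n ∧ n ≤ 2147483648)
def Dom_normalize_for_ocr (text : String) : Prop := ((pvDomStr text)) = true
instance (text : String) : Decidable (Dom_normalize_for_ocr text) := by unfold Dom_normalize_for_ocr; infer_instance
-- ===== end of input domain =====

-- B replaces A's ten sequential full-string str.replace passes by one per-character
-- table-driven pass over text.upper(), joined once (objective: alternative single-pass algorithm).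

-- ===== PORT A =====
def normalize_for_ocr (text : String) : String :=
  let t0 := PySem.Str.upper text
  let t1 := PySem.Str.replace t0 "O" "0"
  let t2 := PySem.Str.replace t1 "o" "0"
  let t3 := PySem.Str.replace t2 "I" "1"
  let t4 := PySem.Str.replace t3 "l" "1"
  let t5 := PySem.Str.replace t4 "S" "5"
  let t6 := PySem.Str.replace t5 "s" "5"
  let t7 := PySem.Str.replace t6 "B" "8"
  let t8 := PySem.Str.replace t7 "A" "4"
  let t9 := PySem.Str.replace t8 "-" ""
  PySem.Str.replace t9 " " ""

-- ===== PORT B =====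
-- the dict literal _OCR_MAP, built by successive insertions
def ocrMap : PySem.Dict Char String :=
  (((((((PySem.Dict.empty.insert 'O' "0").insert 'I' "1").insert 'S' "5").insert
      'B' "8").insert 'A' "4").insert '-' "").insert ' ' "")

def normalize_for_ocr_alt (text : String) : String :=
  PySem.Str.join "" ((PySem.Str.upper text).toList.map
    (fun c => ocrMap.getD c (String.ofList [c])))

-- ===== PRECONDITION & SPEC =====
def Spec_normalize_for_ocr (text : String) (out : String) : Prop := out = normalize_for_ocr_alt text
instance (text : String) (out : String) : Decidable (Spec_normalize_for_ocr text out) := by unfold Spec_normalize_for_ocr; infer_instance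

-- ===== CLAIM (what is proved, stated in full; the proofs are below) =====
def Claim_equal_normalize_for_ocr : Prop := ∀ (text : String), Dom_normalize_for_ocr text → Spec_normalize_for_ocr text (normalize_for_ocr text)

-- ===== LEMMAS AND PROOFS =====

-- B's per-character table lookup, as a list-of-characters function
def bFun (c : Char) : List Char := (ocrMap.getD c (String.ofList [c])).toList

-- replace.go with a single-character pattern, characterised as a flatMap
theorem go_single (o : Char) (new : List Char) :
    ∀ (l : List Char) (fuel : Nat), l.length ≤ fuel → ∀ acc,
    PySem.Chars.replace.go [o] new fuel l acc
      = acc.reverse ++ l.flatMap (fun c => if c = o then new else [c]) := by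
  intro l
  induction l with
  | nil => intro fuel _ acc; cases fuel <;> simp [PySem.Chars.replace.go]
  | cons c t ih =>
    intro fuel hf acc
    cases fuel with
    | zero => simp at hf
    | succ n =>
      rw [PySem.Chars.replace.go]
      by_cases h : c = o
      · subst h
        simp only [List.isPrefixOf, beq_self_eq_true, Bool.true_and, List.drop, List.length]
        rw [ih n (by simpa using hf)]
        simp
      · have hne : (o == c && true) = false := by simp [Ne.symm h]
        simp only [List.isPrefixOf, hne, Bool.false_eq_true, if_false]
        rw [ih n (by simpa using hf)]
        simp [h]

-- str.replace with a single-character pattern is a per-character flatMap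
theorem replace_single (cs : List Char) (o : Char) (new : List Char) :
    PySem.Chars.replace cs [o] new = cs.flatMap (fun c => if c = o then new else [c]) := by
  simp [PySem.Chars.replace]
  rw [go_single o new cs cs.length le_rfl []]
  simp

-- after upper(), no character is an ASCII lowercase letter
theorem islower_upperChar (c : Char) : PySem.Chars.islower (PySem.Chars.upperChar c) = false := by
  unfold PySem.Chars.upperChar
  by_cases h : ('a' ≤ c ∧ c ≤ 'z')
  · have hb : 97 ≤ c.toNat ∧ c.toNat ≤ 122 := by
      obtain ⟨h1, h2⟩ := h
      rw [Char.le_def] at h1 h2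
      exact ⟨h1, h2⟩
    rw [if_pos (by simp [PySem.Chars.islower, h.1, h.2])]
    have hv : (Char.ofNat (c.toNat - 32)).toNat = c.toNat - 32 := by
      rw [Char.toNat_ofNat, if_pos]; exact Or.inl (by omega)
    simp only [PySem.Chars.islower, Bool.and_eq_false_iff, decide_eq_false_iff_not, Char.le_def]
    left
    show ¬ ((97:Nat) ≤ (Char.ofNat (c.toNat - 32)).toNat)
    omega
  · have hcond : (decide ('a' ≤ c) && decide (c ≤ 'z')) = false := by
      simp only [Bool.and_eq_false_iff, decide_eq_false_iff_not]
      by_cases h1 : 'a' ≤ c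
      · right; intro h2; exact h ⟨h1, h2⟩
      · left; exact h1
    rw [if_neg (by unfold PySem.Chars.islower; simp [hcond])]
    unfold PySem.Chars.islower
    exact hcond

-- pointwise: A's ten replacement functions, composed on one non-lowercase char, give B's table entry
theorem point_eq (c : Char) (hc : PySem.Chars.islower c = false) :
    ((((((((((if c = 'O' then ['0'] else [c])).flatMap
      (fun c => if c = 'o' then ['0'] else [c])).flatMap
      (fun c => if c = 'I' then ['1'] else [c])).flatMap
      (fun c => if c = 'l' then ['1'] else [c])).flatMap
      (fun c => if c = 'S' then ['5'] else [c])).flatMap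
      (fun c => if c = 's' then ['5'] else [c])).flatMap
      (fun c => if c = 'B' then ['8'] else [c])).flatMap
      (fun c => if c = 'A' then ['4'] else [c])).flatMap
      (fun c => if c = '-' then [] else [c])).flatMap
      (fun c => if c = ' ' then [] else [c]) = bFun c := by
  have ho : c ≠ 'o' := fun h => by subst h; simp [PySem.Chars.islower] at hc
  have hl : c ≠ 'l' := fun h => by subst h; simp [PySem.Chars.islower] at hc
  have hs : c ≠ 's' := fun h => by subst h; simp [PySem.Chars.islower] at hc
  by_cases h1 : c = 'O'; · subst h1; decide
  by_cases h2 : c = 'I'; · subst h2; decide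
  by_cases h3 : c = 'S'; · subst h3; decide
  by_cases h4 : c = 'B'; · subst h4; decide
  by_cases h5 : c = 'A'; · subst h5; decide
  by_cases h6 : c = '-'; · subst h6; decide
  by_cases h7 : c = ' '; · subst h7; decide
  simp [bFun, ocrMap, PySem.Dict.getD_insert, PySem.Dict.getD_empty,
    h1, h2, h3, h4, h5, h6, h7, ho, hl, hs]

-- A's whole chain of replacements over a lowercase-free string is one flatMap of B's table
theorem chain_list (u : List Char) (hu : ∀ c ∈ u, PySem.Chars.islower c = false) :
    (((((((((u.flatMap (fun c => if c = 'O' then ['0'] else [c])).flatMap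
      (fun c => if c = 'o' then ['0'] else [c])).flatMap
      (fun c => if c = 'I' then ['1'] else [c])).flatMap
      (fun c => if c = 'l' then ['1'] else [c])).flatMap
      (fun c => if c = 'S' then ['5'] else [c])).flatMap
      (fun c => if c = 's' then ['5'] else [c])).flatMap
      (fun c => if c = 'B' then ['8'] else [c])).flatMap
      (fun c => if c = 'A' then ['4'] else [c])).flatMap
      (fun c => if c = '-' then [] else [c])).flatMap
      (fun c => if c = ' ' then [] else [c]) = u.flatMap bFun := by
  induction u with
  | nil => rfl
  | cons c u ih =>
    have hc := hu c (by simp)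
    have ih' := ih (fun d hd => hu d (by simp [hd]))
    simp only [List.flatMap_cons, List.flatMap_append] at *
    rw [ih', ← point_eq c hc]

-- flatten ignores empty separators inserted by ''.join
theorem flatten_intersperse_nil {α : Type} (l : List (List α)) :
    (List.intersperse [] l).flatten = l.flatten := by
  induction l with
  | nil => rfl
  | cons x t ih =>
    cases t with
    | nil => rfl
    | cons y u =>
      rw [List.intersperse_cons₂]
      simp only [List.flatten_cons, List.nil_append] at *
      rw [ih]

-- B's result, as a flatMap over the uppercased character list
theorem alt_toList (text : String) :
    (normalize_for_ocr_alt text).toList = (PySem.Chars.upper text.toList).flatMap bFun := by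
  unfold normalize_for_ocr_alt
  rw [PySem.Str.toList_join, PySem.Str.toList_upper]
  simp only [PySem.Chars.join, List.intercalate, List.map_map, List.flatMap_def]
  rw [show ("".toList : List Char) = [] from rfl, flatten_intersperse_nil]
  rfl

-- ===== VERDICT (by name: the statement is the Claim_ definition above) =====
theorem normalize_for_ocr_spec : Claim_equal_normalize_for_ocr := by
  unfold Claim_equal_normalize_for_ocr Spec_normalize_for_ocr
  intro text _
  apply String.toList_inj.mp
  rw [alt_toList]
  unfold normalize_for_ocr
  simp only [PySem.Str.toList_replace, PySem.Str.toList_upper,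
    show ("O".toList : List Char) = ['O'] from rfl, show ("o".toList : List Char) = ['o'] from rfl,
    show ("I".toList : List Char) = ['I'] from rfl, show ("l".toList : List Char) = ['l'] from rfl,
    show ("S".toList : List Char) = ['S'] from rfl, show ("s".toList : List Char) = ['s'] from rfl,
    show ("B".toList : List Char) = ['B'] from rfl, show ("A".toList : List Char) = ['A'] from rfl,
    show ("-".toList : List Char) = ['-'] from rfl, show (" ".toList : List Char) = [' '] from rfl,
    show ("0".toList : List Char) = ['0'] from rfl, show ("1".toList : List Char) = ['1'] from rfl,
    show ("5".toList : List Char) = ['5'] from rfl, show ("8".toList : List Char) = ['8'] from rfl,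
    show ("4".toList : List Char) = ['4'] from rfl, show ("".toList : List Char) = [] from rfl,
    replace_single]
  apply chain_list
  intro c hc
  rcases List.mem_map.mp hc with ⟨d, _, rfl⟩
  exact islower_upperChar d
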